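-- pv_equiv track=rewrite | github.com/azzid/aoc | 2023/aoc02.py | gameminbag
-- ===== SOURCE A (Python) =====
-- def gameminbag(game):
--   bag = {}
--   for pull in game:
--     for color in pull.keys():
--       try:
--         if pull[color] > bag[color]:
--           bag[color] = pull[color]
--       except:
--         bag[color] = pull[color]
--   return bag
-- ===== SOURCE B (Python) =====
-- def gameminbag(game):
--   # group-then-reduce: collect every pulled count per color, then take max per color
--   groups = {}
--   for pull in game:
--     for color, n in pull.items():
--       groups[color] = groups.get(color, []) + [n]
--   return {color: max(ns) for color, ns in groups.items()}
-- ===== Notes on version B (the rewrite author's own statement) =====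
-- stated objective: alternative
-- what changed: Replaces A's online compare-and-update running maximum (with its try/except KeyError initialisation) by a two-pass group-then-reduce: one pass building a color -> list-of-counts table, then a dict comprehension taking max of each group.
import Mathlib
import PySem

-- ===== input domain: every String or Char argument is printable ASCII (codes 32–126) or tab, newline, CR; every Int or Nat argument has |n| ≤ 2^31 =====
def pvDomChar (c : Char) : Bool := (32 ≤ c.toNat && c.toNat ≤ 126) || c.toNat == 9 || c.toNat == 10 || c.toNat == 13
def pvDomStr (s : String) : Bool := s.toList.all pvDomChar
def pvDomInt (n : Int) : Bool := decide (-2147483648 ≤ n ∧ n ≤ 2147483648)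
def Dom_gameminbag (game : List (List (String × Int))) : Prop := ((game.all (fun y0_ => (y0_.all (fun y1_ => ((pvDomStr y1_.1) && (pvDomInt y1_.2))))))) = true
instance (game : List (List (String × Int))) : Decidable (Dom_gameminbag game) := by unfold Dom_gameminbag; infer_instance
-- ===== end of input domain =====

-- B replaces A's online running max (compare-and-update with try/except init) by a
-- group-then-reduce pass (color -> list of counts, then max per group); alternative, same cost.

-- ===== PORT A =====
-- loop body of A: try compare-and-update, except (missing key) initialise
def pvStepA (bag : PySem.Dict String Int) (p : String × Int) : PySem.Dict String Int :=
  match bag.get? p.1 with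
  | some b => if p.2 > b then bag.insert p.1 p.2 else bag
  | none => bag.insert p.1 p.2

def gameminbag (game : List (List (String × Int))) : List (String × Int) :=
  -- bag = {}; for pull in game: for color in pull.keys(): try/except update; return bag
  (game.foldl (fun bag pull =>
      let d := PySem.Dict.ofList pull
      d.keys.foldl (fun bag color => pvStepA bag (color, d.getD color 0)) bag)
    PySem.Dict.empty).items

-- ===== PORT B =====
-- max(ns) for a nonempty Python list
def pvMax : List Int → Int
  | [] => 0
  | v :: r => r.foldl max v

-- loop body of B's grouping pass: groups[color] = groups.get(color, []) + [n]
def pvStepB (g : PySem.Dict String (List Int)) (p : String × Int) : PySem.Dict String (List Int) :=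
  g.insert p.1 (g.getD p.1 [] ++ [p.2])

def gameminbag_alt (game : List (List (String × Int))) : List (String × Int) :=
  ((game.foldl (fun g pull => (PySem.Dict.ofList pull).items.foldl pvStepB g)
    (PySem.Dict.empty : PySem.Dict String (List Int))).items).map (fun p => (p.1, pvMax p.2))

-- ===== PRECONDITION & SPEC =====
def Spec_gameminbag (game : List (List (String × Int))) (out : List (String × Int)) : Prop := out = gameminbag_alt game
instance (game : List (List (String × Int))) (out : List (String × Int)) : Decidable (Spec_gameminbag game out) := by unfold Spec_gameminbag; infer_instance

-- ===== CLAIM (what is proved, stated in full; the proofs are below) =====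
def Claim_equal_gameminbag : Prop := ∀ (game : List (List (String × Int))), Dom_gameminbag game → Spec_gameminbag game (gameminbag game)

-- ===== LEMMAS AND PROOFS =====

-- invariant relating A's running-max bag to B's grouping table
def pvInv (bag : PySem.Dict String Int) (g : PySem.Dict String (List Int)) : Prop :=
  bag.keys = g.keys ∧ g.keys.Nodup ∧
    ∀ c ∈ g.keys, g.getD c [] ≠ [] ∧ bag.getD c 0 = pvMax (g.getD c [])

theorem pvMax_append (vs : List Int) (v : Int) (h : vs ≠ []) :
    pvMax (vs ++ [v]) = max (pvMax vs) v := by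
  cases vs with
  | nil => exact absurd rfl h
  | cons x r => simp [pvMax, List.foldl_append]

theorem pvInv_step (bag : PySem.Dict String Int) (g : PySem.Dict String (List Int))
    (p : String × Int) (h : pvInv bag g) : pvInv (pvStepA bag p) (pvStepB g p) := by
  obtain ⟨hk, hnd, hv⟩ := h
  obtain ⟨c, v⟩ := p
  by_cases hc : c ∈ g.keys
  · -- existing color: A compares-and-updates, B appends
    obtain ⟨hne, hgd⟩ := hv c hc
    have hbc : bag.get? c ≠ none := by
      simp only [Ne, PySem.Dict.get?_eq_none_iff_not_mem_keys, hk]; simpa using hc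
    obtain ⟨m, hm⟩ := Option.ne_none_iff_exists'.mp hbc
    have hmd : bag.getD c 0 = m := PySem.Dict.getD_of_get?_eq_some bag 0 hm
    have hbcon : bag.contains c := by
      rw [PySem.Dict.contains_iff_mem_keys, hk]; exact hc
    have hgcon : g.contains c := by rw [PySem.Dict.contains_iff_mem_keys]; exact hc
    have hkeysB : (pvStepB g (c, v)).keys = g.keys := by
      simp [pvStepB, PySem.Dict.keys_insert_of_contains g _ hgcon]
    have hkeysA : ∀ w : Int, (bag.insert c w).keys = bag.keys := fun w =>
      PySem.Dict.keys_insert_of_contains bag w hbcon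
    refine ⟨?_, by rw [hkeysB]; exact hnd, ?_⟩
    · simp only [pvStepA, hm, hkeysB]
      split <;> simp [hkeysA, hk]
    · intro c' hc'
      rw [hkeysB] at hc'
      by_cases he : c' = c
      · subst he
        have hgB : (pvStepB g (c', v)).getD c' [] = g.getD c' [] ++ [v] := by
          simp [pvStepB, PySem.Dict.getD_insert_self]
        refine ⟨by simp [hgB], ?_⟩
        rw [hgB, pvMax_append _ _ hne, ← hgd, hmd]
        simp only [pvStepA, hm]
        split <;> simp_all [PySem.Dict.getD_insert_self] <;> omega
      · have hgB : (pvStepB g (c, v)).getD c' [] = g.getD c' [] := by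
          simp [pvStepB, PySem.Dict.getD_insert_of_ne _ _ _ he]
        obtain ⟨hne', hgd'⟩ := hv c' hc'
        refine ⟨by rw [hgB]; exact hne', ?_⟩
        rw [hgB, ← hgd']
        simp only [pvStepA, hm]
        split <;> simp [PySem.Dict.getD_insert_of_ne _ _ _ he]
  · -- new color: both sides append it
    have hbc : bag.get? c = none := by
      rw [PySem.Dict.get?_eq_none_iff_not_mem_keys, hk]; exact hc
    have hbcon : bag.contains c = false := by
      rw [PySem.Dict.contains_eq_isSome_get?, hbc]; rfl
    have hgcon : g.contains c = false := by
      have := PySem.Dict.contains_iff_mem_keys (d := g) (k := c)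
      by_contra h'
      exact hc (this.mp (by simpa using h'))
    have hgd0 : g.getD c [] = [] := PySem.Dict.getD_of_not_contains g [] hgcon
    have hkeysA : (pvStepA bag (c, v)).keys = bag.keys ++ [c] := by
      simp only [pvStepA, hbc]
      exact PySem.Dict.keys_insert_of_not_contains bag v hbcon
    have hkeysB : (pvStepB g (c, v)).keys = g.keys ++ [c] := by
      simp only [pvStepB]
      exact PySem.Dict.keys_insert_of_not_contains g _ hgcon
    refine ⟨by rw [hkeysA, hkeysB, hk], ?_, ?_⟩
    · rw [hkeysB]
      simp only [List.nodup_append]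
      refine ⟨hnd, by simp, ?_⟩
      intro a ha b hb
      simp only [List.mem_singleton] at hb
      subst hb; exact fun h => hc (h ▸ ha)
    · intro c' hc'
      rw [hkeysB] at hc'
      by_cases he : c' = c
      · subst he
        have hgB : (pvStepB g (c', v)).getD c' [] = [v] := by
          simp [pvStepB, PySem.Dict.getD_insert_self, hgd0]
        refine ⟨by simp [hgB], ?_⟩
        simp [hgB, pvMax, pvStepA, hbc, PySem.Dict.getD_insert_self]
      · have hc'' : c' ∈ g.keys := by
          rcases List.mem_append.mp hc' with h' | h'
          · exact h'
          · exact absurd (by simpa using h') he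
        obtain ⟨hne', hgd'⟩ := hv c' hc''
        have hgB : (pvStepB g (c, v)).getD c' [] = g.getD c' [] := by
          simp [pvStepB, PySem.Dict.getD_insert_of_ne _ _ _ he]
        refine ⟨by rw [hgB]; exact hne', ?_⟩
        rw [hgB, ← hgd']
        simp [pvStepA, hbc, PySem.Dict.getD_insert_of_ne _ _ _ he]

theorem pvInv_foldl (L : List (String × Int)) (bag : PySem.Dict String Int)
    (g : PySem.Dict String (List Int)) (h : pvInv bag g) :
    pvInv (L.foldl pvStepA bag) (L.foldl pvStepB g) := by
  induction L generalizing bag g with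
  | nil => exact h
  | cons p L ih => exact ih _ _ (pvInv_step bag g p h)

-- A's keys-with-lookup loop over a pull is the items loop over the same pull
theorem pvInnerA_eq (d : PySem.Dict String Int) (bag : PySem.Dict String Int)
    (hnd : d.keys.Nodup) :
    d.keys.foldl (fun bag color => pvStepA bag (color, d.getD color 0)) bag
      = d.items.foldl pvStepA bag := by
  rw [PySem.Dict.items_eq_map_keys d hnd 0, List.foldl_map]

theorem pvInv_game (game : List (List (String × Int)))
    (bag : PySem.Dict String Int) (g : PySem.Dict String (List Int)) (h : pvInv bag g) :
    pvInv
      (game.foldl (fun bag pull =>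
        let d := PySem.Dict.ofList pull
        d.keys.foldl (fun bag color => pvStepA bag (color, d.getD color 0)) bag) bag)
      (game.foldl (fun g pull => (PySem.Dict.ofList pull).items.foldl pvStepB g) g) := by
  induction game generalizing bag g with
  | nil => exact h
  | cons pull rest ih =>
    simp only [List.foldl_cons]
    rw [pvInnerA_eq _ _ (PySem.Dict.nodup_keys_ofList pull)]
    exact ih _ _ (pvInv_foldl _ _ _ h)

theorem pvInv_empty : pvInv PySem.Dict.empty PySem.Dict.empty := by
  refine ⟨rfl, ?_, ?_⟩ <;> simp [PySem.Dict.keys_empty]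

-- ===== VERDICT (by name: the statement is the Claim_ definition above) =====
theorem gameminbag_spec : Claim_equal_gameminbag := by
  intro game _
  unfold Spec_gameminbag gameminbag gameminbag_alt
  obtain ⟨hk, hnd, hv⟩ := pvInv_game game PySem.Dict.empty PySem.Dict.empty pvInv_empty
  rw [PySem.Dict.items_eq_map_keys _ (hk ▸ hnd) 0,
      PySem.Dict.items_eq_map_keys _ hnd ([] : List Int), List.map_map, hk]
  refine List.map_congr_left fun c hc => ?_
  simp [Function.comp, (hv c hc).2]
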